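-- pv_equiv track=rewrite | github.com/david-l-anderson-dlande/Sudoku_solver | Sudoku_recursion_caller.py | lists_reduce
-- ===== SOURCE A (Python) =====
-- def lists_reduce(current_row, current_column, current_block, dimension):
--     element_restrictions = []
--     used_list = []
--     used_list.extend(current_row)
--     used_list.extend(current_column)
--     used_list.extend(current_block)
--     for i in range(dimension**2):
--         if used_list.count(i+1) > 0:
--             element_restrictions.append(i+1)
--     return element_restrictions
-- ===== SOURCE B (Python) =====
-- def lists_reduce(current_row, current_column, current_block, dimension):
--     used = set(current_row) | set(current_column) | set(current_block)
--     return sorted(used & set(range(1, dimension**2 + 1)))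
-- ===== Notes on version B (the rewrite author's own statement) =====
-- stated objective: faster
-- what changed: Instead of scanning every candidate 1..dimension^2 and running list.count over the concatenated lists for each candidate, B builds the set union of the three lists once, intersects it with set(range(1, dimension^2+1)) and sorts the result.
import Mathlib
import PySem

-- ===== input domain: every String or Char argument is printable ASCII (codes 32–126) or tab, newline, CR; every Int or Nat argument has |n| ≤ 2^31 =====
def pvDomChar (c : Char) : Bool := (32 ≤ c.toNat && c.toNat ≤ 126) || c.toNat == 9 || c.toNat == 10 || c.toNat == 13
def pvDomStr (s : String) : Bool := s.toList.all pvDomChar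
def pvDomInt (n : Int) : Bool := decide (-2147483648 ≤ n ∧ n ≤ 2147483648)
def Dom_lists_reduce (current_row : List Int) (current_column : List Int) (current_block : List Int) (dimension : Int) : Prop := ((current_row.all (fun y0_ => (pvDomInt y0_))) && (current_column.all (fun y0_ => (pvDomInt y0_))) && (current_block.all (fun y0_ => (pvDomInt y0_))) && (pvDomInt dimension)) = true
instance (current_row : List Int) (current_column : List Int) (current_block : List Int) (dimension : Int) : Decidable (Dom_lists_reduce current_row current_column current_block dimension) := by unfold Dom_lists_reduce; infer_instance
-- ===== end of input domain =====

-- B replaces A's scan of every candidate 1..dimension^2 (with a list.count pass each) by one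
-- set union of the three lists, intersected with the candidate range and sorted. (objective: simpler)

-- ===== PORT A =====
def lists_reduce (current_row : List Int) (current_column : List Int) (current_block : List Int) (dimension : Int) : List Int :=
  let used_list : List Int := ([] : List Int) ++ current_row ++ current_column ++ current_block
  (PySem.List.pyRange 0 (dimension ^ 2) 1).foldl
    (fun element_restrictions i =>
      if PySem.List.count used_list (i + 1) > 0 then element_restrictions ++ [i + 1]
      else element_restrictions) []

-- ===== PORT B =====
def lists_reduce_alt (current_row : List Int) (current_column : List Int) (current_block : List Int) (dimension : Int) : List Int :=
  let used : PySem.Set Int :=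
    PySem.Set.union (PySem.Set.union (PySem.Set.ofList current_row) (PySem.Set.ofList current_column))
      (PySem.Set.ofList current_block)
  PySem.List.sorted (PySem.Set.inter used (PySem.Set.ofList (PySem.List.pyRange 1 (dimension ^ 2 + 1) 1)))
    (fun x => x) false

-- ===== PRECONDITION & SPEC =====
def Spec_lists_reduce (current_row : List Int) (current_column : List Int) (current_block : List Int) (dimension : Int) (out : List Int) : Prop := out = lists_reduce_alt current_row current_column current_block dimension
instance (current_row : List Int) (current_column : List Int) (current_block : List Int) (dimension : Int) (out : List Int) : Decidable (Spec_lists_reduce current_row current_column current_block dimension out) := by unfold Spec_lists_reduce; infer_instance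

-- ===== CLAIM (what is proved, stated in full; the proofs are below) =====
def Claim_equal_lists_reduce : Prop := ∀ (current_row : List Int) (current_column : List Int) (current_block : List Int) (dimension : Int), Dom_lists_reduce current_row current_column current_block dimension → Spec_lists_reduce current_row current_column current_block dimension (lists_reduce current_row current_column current_block dimension)

-- ===== LEMMAS AND PROOFS =====

-- A's loop body uses a Prop-valued test, so PySem.List.foldl_append_if (Bool test) does not
-- apply syntactically; this is the same shape proved for A's exact ite.
lemma foldlA_shape (used : List Int) (l : List Int) (acc : List Int) :
    l.foldl (fun a i => if PySem.List.count used (i + 1) > 0 then a ++ [i + 1] else a) acc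
      = acc ++ (l.filter (fun i => decide (PySem.List.count used (i + 1) > 0))).map (fun i => i + 1) := by
  induction l generalizing acc with
  | nil => simp
  | cons x xs ih =>
    by_cases hx : PySem.List.count used (x + 1) > 0
    · rw [List.foldl_cons, if_pos hx, ih, List.filter_cons, if_pos (by simpa using hx)]
      simp
    · rw [List.foldl_cons, if_neg hx, ih, List.filter_cons, if_neg (by simpa using hx)]

-- A's result is the filtered-shifted range.
lemma listsReduceA_eq_filter (r c b : List Int) (d : Int) :
    lists_reduce r c b d =
      ((PySem.List.pyRange 0 (d ^ 2) 1).filter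
        (fun i => PySem.List.count (r ++ c ++ b) (i + 1) > 0)).map (fun i => i + 1) := by
  rw [show lists_reduce r c b d = (PySem.List.pyRange 0 (d ^ 2) 1).foldl
      (fun a i => if PySem.List.count (r ++ c ++ b) (i + 1) > 0 then a ++ [i + 1] else a) [] from rfl,
    foldlA_shape]
  simp

lemma listsReduceA_pairwise (r c b : List Int) (d : Int) :
    (lists_reduce r c b d).Pairwise (· < ·) := by
  rw [listsReduceA_eq_filter]
  exact (List.Pairwise.filter _ (PySem.List.pairwise_lt_pyRange_one 0 (d ^ 2))).map
    (fun i => i + 1) (by intro a b h; show a + 1 < b + 1; omega)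

lemma listsReduceA_mem (r c b : List Int) (d : Int) (x : Int) :
    x ∈ lists_reduce r c b d ↔ (x ∈ r ∨ x ∈ c ∨ x ∈ b) ∧ 1 ≤ x ∧ x < d ^ 2 + 1 := by
  rw [listsReduceA_eq_filter]
  simp only [List.mem_map, List.mem_filter, PySem.List.mem_pyRange_one, decide_eq_true_eq,
    gt_iff_lt, PySem.List.count_eq, List.count_pos_iff, List.mem_append]
  constructor
  · rintro ⟨i, ⟨⟨h0, hlt⟩, hmem⟩, rfl⟩
    exact ⟨by tauto, by omega, by omega⟩
  · rintro ⟨hmem, h1, h2⟩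
    exact ⟨x - 1, ⟨⟨by omega, by omega⟩, by simpa using by tauto⟩, by omega⟩

lemma listsReduceB_set_mem (r c b : List Int) (d : Int) (x : Int) :
    x ∈ PySem.Set.inter
        (PySem.Set.union (PySem.Set.union (PySem.Set.ofList r) (PySem.Set.ofList c))
          (PySem.Set.ofList b))
        (PySem.Set.ofList (PySem.List.pyRange 1 (d ^ 2 + 1) 1)) ↔
      (x ∈ r ∨ x ∈ c ∨ x ∈ b) ∧ 1 ≤ x ∧ x < d ^ 2 + 1 := by
  simp [PySem.Set.mem_inter, PySem.Set.mem_union, PySem.Set.mem_ofList,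
    PySem.List.mem_pyRange_one, or_assoc]

theorem lists_reduce_spec_aux (r c b : List Int) (d : Int) :
    lists_reduce r c b d = lists_reduce_alt r c b d := by
  unfold lists_reduce_alt
  refine (PySem.List.sorted_eq_of_perm_of_pairwise_lt _ _ (fun x => x) ?_ ?_).symm
  · rw [List.perm_ext_iff_of_nodup (listsReduceA_pairwise r c b d).nodup
      (PySem.Set.nodup_inter _ _
        (PySem.Set.nodup_union _ _ (PySem.Set.nodup_union _ _ (PySem.Set.nodup_ofList r))))]
    intro x
    rw [listsReduceA_mem, listsReduceB_set_mem]
  · exact listsReduceA_pairwise r c b d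

-- ===== VERDICT (by name: the statement is the Claim_ definition above) =====
theorem lists_reduce_spec : Claim_equal_lists_reduce := by
  intro r c b d _
  unfold Spec_lists_reduce
  exact lists_reduce_spec_aux r c b d
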